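-- pv_equiv track=rewrite | github.com/zoejuu/leetcode | programmers/내일은 코딩테스트 with 파이썬/babbling.py | solution
-- ===== SOURCE A (Python) =====
-- def solution(babbling):
--     '''https://school.programmers.co.kr/learn/courses/30/lessons/120956'''
--     answer = 0
--     babbles = ["aya", "ye", "woo", "ma"]
--     for b in babbling:
--         for babble in babbles:
--             b = b.replace(babble, "0")
--             if len(b.replace("0", "")) == 0:
--                 answer += 1
--                 break
--
--     return answer
-- ===== SOURCE B (Python) =====
-- def ok(w):
--     if not w:
--         return True
--     if w.startswith("aya"):
--         return ok(w[3:])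
--     if w.startswith("ye"):
--         return ok(w[2:])
--     if w.startswith("woo"):
--         return ok(w[3:])
--     if w.startswith("ma"):
--         return ok(w[2:])
--     return False
--
--
-- def solution(babbling):
--     return sum(1 for b in babbling if ok(b))
-- ===== Notes on version B (the rewrite author's own statement) =====
-- stated objective: idiomatic
-- what changed: A tests each word by globally replacing the four babbles with a '0' marker and checking that only markers remain; B instead greedily strips a matching babble prefix from the word by direct recursion (word-break) with no marker string, counting words whose suffix is fully consumed.
-- intended difference: On lists containing a word that is a concatenation of "aya","ye","woo","ma" and at least one literal '0' character (e.g. "0" or "aya0"), A counts the word because the literal zeros merge with its replace marker, while B rejects it; '0' is not a babbling sound, so B's count is the intended one. — e.g. on solution(["0"]): A returns 1, B returns 0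
import Mathlib
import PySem

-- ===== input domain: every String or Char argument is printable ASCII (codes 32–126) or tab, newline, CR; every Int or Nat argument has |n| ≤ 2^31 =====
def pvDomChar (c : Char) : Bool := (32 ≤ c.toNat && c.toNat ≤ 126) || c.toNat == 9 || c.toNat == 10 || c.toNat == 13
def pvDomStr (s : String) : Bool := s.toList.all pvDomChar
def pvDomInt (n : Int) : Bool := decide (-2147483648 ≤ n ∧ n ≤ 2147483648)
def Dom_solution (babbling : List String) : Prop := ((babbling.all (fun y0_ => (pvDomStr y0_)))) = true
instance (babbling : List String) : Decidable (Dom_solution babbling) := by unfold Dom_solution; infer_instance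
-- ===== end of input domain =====

-- B replaces A's replace-marker trick (substitute each babble by "0", test that only "0"s remain)
-- by a greedy prefix-consumption recursion over the four babbles; equal counts except on words
-- that contain a literal '0' character (see D_solution below). Objective: idiomatic, not faster.

-- ===== PORT A =====
-- inner 'for babble in babbles' loop of A, carrying the mutated b; 'break' = returning true
def innerLoop : List String → String → Bool
  | [], _ => false
  | babble :: rest, b =>
    let b2 := PySem.Str.replace b babble "0"
    if PySem.Str.len (PySem.Str.replace b2 "0" "") == 0 then true
    else innerLoop rest b2

def solution (babbling : List String) : Int :=
  babbling.foldl (fun answer b => if innerLoop ["aya", "ye", "woo", "ma"] b then answer + 1 else answer) 0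

-- ===== PORT B =====
-- port of Source B's ok: greedy prefix stripping on the character list (w[3:] = drop 3)
def okBgo : Nat → List Char → Bool
  | _, [] => true
  | 0, _ :: _ => false    -- fuel ≥ length, so never reached
  | fuel + 1, c :: t =>
    if ['a', 'y', 'a'].isPrefixOf (c :: t) then okBgo fuel ((c :: t).drop 3)
    else if ['y', 'e'].isPrefixOf (c :: t) then okBgo fuel ((c :: t).drop 2)
    else if ['w', 'o', 'o'].isPrefixOf (c :: t) then okBgo fuel ((c :: t).drop 3)
    else if ['m', 'a'].isPrefixOf (c :: t) then okBgo fuel ((c :: t).drop 2)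
    else false

def okB (w : List Char) : Bool := okBgo w.length w

def solution_alt (babbling : List String) : Int :=
  ((babbling.countP (fun b => okB b.toList) : Nat) : Int)

-- ===== PRECONDITION & SPEC =====
-- recognizer (DFA style) for words that are concatenations of "aya","ye","woo","ma" and "0";
-- used only to state the change region D_solution
def zTile : List Char → Bool
  | [] => true
  | '0' :: r => zTile r
  | 'a' :: 'y' :: 'a' :: r => zTile r
  | 'y' :: 'e' :: r => zTile r
  | 'w' :: 'o' :: 'o' :: r => zTile r
  | 'm' :: 'a' :: r => zTile r
  | _ => false

-- On lists containing a word that is a concatenation of "aya","ye","woo","ma" and at least one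
-- literal '0' (e.g. "0", "aya0"), A counts the word because the '0's merge with its replace
-- marker, while B rejects it; '0' is not a babbling sound, so B's count is the intended one.
def D_solution (babbling : List String) : Prop :=
  ∃ b ∈ babbling, '0' ∈ b.toList ∧ zTile b.toList = true

instance (babbling : List String) : Decidable (D_solution babbling) := by
  unfold D_solution; infer_instance

def Spec_solution (babbling : List String) (out : Int) : Prop :=
  ¬ D_solution babbling → out = solution_alt babbling
instance (babbling : List String) (out : Int) : Decidable (Spec_solution babbling out) := by
  unfold Spec_solution; infer_instance

def pvDiffWitness_solution : List String := ["0"]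
def pvDiffWitnessOut_solution : Int × Int := (1, 0)

-- ===== CLAIM (what is proved, stated in full; the proofs are below) =====
def Claim_unchanged_solution : Prop :=
  ∀ (babbling : List String), Dom_solution babbling → Spec_solution babbling (solution babbling)
def Claim_changed_solution : Prop :=
  Dom_solution (pvDiffWitness_solution) ∧ D_solution (pvDiffWitness_solution) ∧
  solution (pvDiffWitness_solution) = pvDiffWitnessOut_solution.1 ∧
  solution_alt (pvDiffWitness_solution) = pvDiffWitnessOut_solution.2 ∧
  pvDiffWitnessOut_solution.1 ≠ pvDiffWitnessOut_solution.2
def Claim_exact_solution : Prop :=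
  ∀ (babbling : List String), Dom_solution babbling → D_solution babbling →
    solution babbling ≠ solution_alt babbling

-- ===== LEMMAS AND PROOFS =====

def rep (old new : List Char) : List Char → List Char
  | [] => []
  | c :: t =>
    if old.isPrefixOf (c :: t) ∧ old ≠ [] then new ++ rep old new (t.drop (old.length - 1))
    else c :: rep old new t
termination_by l => l.length
decreasing_by all_goals (simp; try omega)

theorem go_eq_rep (old new : List Char) (h : old ≠ []) :
    ∀ fuel l acc, l.length ≤ fuel →
      PySem.Chars.replace.go old new fuel l acc = acc.reverse ++ rep old new l := by
  intro fuel
  induction fuel with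
  | zero =>
    intro l acc hl
    have : l = [] := List.eq_nil_of_length_eq_zero (Nat.le_zero.mp hl)
    subst this
    simp [PySem.Chars.replace.go, rep]
  | succ n ih =>
    intro l acc hl
    match l with
    | [] => simp [PySem.Chars.replace.go, rep]
    | c :: t =>
      rw [PySem.Chars.replace.go]
      by_cases hp : old.isPrefixOf (c :: t)
      · have hlen : 1 ≤ old.length := by
          cases old with
          | nil => exact absurd rfl h
          | cons _ _ => simp
        have hdrop : (c :: t).drop old.length = t.drop (old.length - 1) := by
          cases old with
          | nil => exact absurd rfl h
          | cons _ _ => simp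
        rw [if_pos hp, hdrop, ih _ _ (by simp [List.length_drop]; simp at hl; omega)]
        rw [rep, if_pos ⟨hp, h⟩]
        simp
      · rw [if_neg hp, ih _ _ (by simpa using Nat.le_of_succ_le_succ (by simpa using hl))]
        rw [rep, if_neg (by simp [hp])]
        simp

theorem replace_eq_rep (old new : List Char) (h : old ≠ []) (s : List Char) :
    PySem.Chars.replace s old new = rep old new s := by
  have hg := go_eq_rep old new h s.length s [] le_rfl
  rw [PySem.Chars.replace, if_neg (by simp [List.isEmpty_iff, h])]
  simpa using hg

def repF (l : List Char) : List Char :=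
  rep ['m', 'a'] ['0'] (rep ['w', 'o', 'o'] ['0'] (rep ['y', 'e'] ['0'] (rep ['a', 'y', 'a'] ['0'] l)))

def allZ (l : List Char) : Bool := l.all (· == '0')

theorem allZ_nil : allZ [] = true := rfl
theorem allZ_cons (c : Char) (l : List Char) : allZ (c :: l) = ((c == '0') && allZ l) := rfl

-- a token that does not start with '0' fixes an all-'0' string
theorem rep_fix (tok new : List Char) (h0 : tok.head? ≠ some '0')
    (x : List Char) (hx : allZ x = true) : rep tok new x = x := by
  induction x with
  | nil => simp [rep]
  | cons c t ih =>
    rw [allZ_cons, Bool.and_eq_true, beq_iff_eq] at hx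
    obtain ⟨hc, ht⟩ := hx
    subst hc
    rw [rep, if_neg, ih ht]
    rintro ⟨hp, hne⟩
    cases tok with
    | nil => exact hne rfl
    | cons d td =>
      simp [List.isPrefixOf] at hp
      simp [hp.1] at h0

theorem chk_eq (x : List Char) : (rep ['0'] [] x = []) ↔ allZ x = true := by
  induction x with
  | nil => simp [rep, allZ_nil]
  | cons c t ih =>
    by_cases hc : c = '0'
    · subst hc
      rw [rep, if_pos (by simp [List.isPrefixOf])]
      simpa [allZ_cons] using ih
    · rw [rep, if_neg (by simp [List.isPrefixOf]; exact fun h => hc h.symm)]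
      simp [allZ_cons, hc]

theorem chkb (b2 : String) :
    (PySem.Str.len (PySem.Str.replace b2 "0" "") == 0) = allZ b2.toList := by
  have h0 : ("0" : String).toList = ['0'] := by decide
  have he : ("" : String).toList = [] := by decide
  have hr := replace_eq_rep ['0'] [] (by simp) b2.toList
  rw [PySem.Str.len, PySem.Str.toList_replace, h0, he, hr]
  cases hA : allZ b2.toList
  · have : ¬ rep ['0'] [] b2.toList = [] := by
      rw [chk_eq]; simp [hA]
    simp [List.length_eq_zero_iff, this]
  · have : rep ['0'] [] b2.toList = [] := (chk_eq _).mpr hA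
    simp [this]

theorem innerLoop_eq (b : String) :
    innerLoop ["aya", "ye", "woo", "ma"] b = allZ (repF b.toList) := by
  have haya : ("aya" : String).toList = ['a', 'y', 'a'] := by decide
  have hye : ("ye" : String).toList = ['y', 'e'] := by decide
  have hwoo : ("woo" : String).toList = ['w', 'o', 'o'] := by decide
  have hma : ("ma" : String).toList = ['m', 'a'] := by decide
  have h0 : ("0" : String).toList = ['0'] := by decide
  set s1 := rep ['a', 'y', 'a'] ['0'] b.toList with hs1
  set s2 := rep ['y', 'e'] ['0'] s1 with hs2
  set s3 := rep ['w', 'o', 'o'] ['0'] s2 with hs3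
  set s4 := rep ['m', 'a'] ['0'] s3 with hs4
  have t1 : (PySem.Str.replace b "aya" "0").toList = s1 := by
    rw [PySem.Str.toList_replace, haya, h0, replace_eq_rep _ _ (by simp)]
  have t2 : (PySem.Str.replace (PySem.Str.replace b "aya" "0") "ye" "0").toList = s2 := by
    rw [PySem.Str.toList_replace, hye, h0, replace_eq_rep _ _ (by simp), t1]
  have t3 : (PySem.Str.replace (PySem.Str.replace (PySem.Str.replace b "aya" "0") "ye" "0") "woo" "0").toList = s3 := by
    rw [PySem.Str.toList_replace, hwoo, h0, replace_eq_rep _ _ (by simp), t2]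
  have t4 : (PySem.Str.replace (PySem.Str.replace (PySem.Str.replace (PySem.Str.replace b "aya" "0") "ye" "0") "woo" "0") "ma" "0").toList = s4 := by
    rw [PySem.Str.toList_replace, hma, h0, replace_eq_rep _ _ (by simp), t3]
  have hF : repF b.toList = s4 := rfl
  simp only [innerLoop, chkb, t1, t2, t3, t4, hF]
  by_cases a1 : allZ s1 = true
  · have e2 : s2 = s1 := rep_fix _ _ (by decide) _ a1
    have e3 : s3 = s1 := by rw [hs3, e2]; exact rep_fix _ _ (by decide) _ a1
    have e4 : s4 = s1 := by rw [hs4, e3]; exact rep_fix _ _ (by decide) _ a1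
    simp [a1, e4]
  · have a1' : allZ s1 = false := by simpa using a1
    by_cases a2 : allZ s2 = true
    · have e3 : s3 = s2 := rep_fix _ _ (by decide) _ a2
      have e4 : s4 = s2 := by rw [hs4, e3]; exact rep_fix _ _ (by decide) _ a2
      simp [a1', a2, e4]
    · have a2' : allZ s2 = false := by simpa using a2
      by_cases a3 : allZ s3 = true
      · have e4 : s4 = s3 := rep_fix _ _ (by decide) _ a3
        simp [a1', a2', a3, e4]
      · have a3' : allZ s3 = false := by simpa using a3
        simp [a1', a2', a3']

theorem rep_pass (tok new : List Char) (c : Char) (t : List Char)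
    (h : tok.head? ≠ some c) : rep tok new (c :: t) = c :: rep tok new t := by
  rw [rep, if_neg]
  rintro ⟨hp, hne⟩
  cases tok with
  | nil => exact hne rfl
  | cons d td =>
    simp [List.isPrefixOf] at hp
    simp [hp.1] at h

theorem rep_head_ne (tok : List Char) (c : Char) (l : List Char)
    (h0 : c ≠ '0') (hl : l.head? ≠ some c) : (rep tok ['0'] l).head? ≠ some c := by
  cases l with
  | nil => simp [rep]
  | cons d t =>
    rw [rep]
    split
    · simp [h0]; intro h; exact h0 h.symm
    · simpa using hl

theorem rep2_cons (a b : Char) (new : List Char) (X : List Char) (h : X.head? ≠ some b) :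
    rep [a, b] new (a :: X) = a :: rep [a, b] new X := by
  rw [rep, if_neg]
  rintro ⟨hp, -⟩
  cases X with
  | nil => simp [List.isPrefixOf] at hp
  | cons d t =>
    simp [List.isPrefixOf] at hp
    simp at h
    exact h hp.symm

theorem repW_cons (new : List Char) (X : List Char) (h : ¬ ['o', 'o'].isPrefixOf X = true) :
    rep ['w', 'o', 'o'] new ('w' :: X) = 'w' :: rep ['w', 'o', 'o'] new X := by
  rw [rep, if_neg]
  rintro ⟨hp, -⟩
  simp [List.isPrefixOf] at hp
  cases X with
  | nil => simp at hp
  | cons d t =>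
    refine absurd hp ?_
    simpa using h

theorem oo_prefix_false (X : List Char) (h : X.head? ≠ some 'o') :
    ¬ ['o', 'o'].isPrefixOf X = true := by
  cases X with
  | nil => simp [List.isPrefixOf]
  | cons d t =>
    simp [List.isPrefixOf]
    intro hd
    exact absurd hd.symm (by simpa using h)

theorem repF_pass (c : Char) (t : List Char) (ha : c ≠ 'a') (hy : c ≠ 'y') (hw : c ≠ 'w')
    (hm : c ≠ 'm') : repF (c :: t) = c :: repF t := by
  rw [repF, rep_pass _ _ _ _ (by simp; exact fun h => ha h.symm),
      rep_pass _ _ _ _ (by simp; exact fun h => hy h.symm),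
      rep_pass _ _ _ _ (by simp; exact fun h => hw h.symm),
      rep_pass _ _ _ _ (by simp; exact fun h => hm h.symm), repF]


theorem zTile_cons_zero (r : List Char) : zTile ('0' :: r) = zTile r := by
  simp [zTile]

theorem zTile_aya (r : List Char) : zTile ('a' :: 'y' :: 'a' :: r) = zTile r := by
  simp [zTile]

theorem zTile_ye (r : List Char) : zTile ('y' :: 'e' :: r) = zTile r := by
  simp [zTile]

theorem zTile_woo (r : List Char) : zTile ('w' :: 'o' :: 'o' :: r) = zTile r := by
  simp [zTile]

theorem zTile_ma (r : List Char) : zTile ('m' :: 'a' :: r) = zTile r := by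
  simp [zTile]

theorem prefix2_shape {a b : Char} {r : List Char} (h : [a, b].isPrefixOf r = true) :
    ∃ r2, r = a :: b :: r2 := by
  match r with
  | [] => simp [List.isPrefixOf] at h
  | [c] => simp [List.isPrefixOf] at h
  | c :: d :: t =>
    simp [List.isPrefixOf] at h
    exact ⟨t, by simp [h.1, h.2]⟩

theorem zTile_a_false {r : List Char} (h : ¬ ['y', 'a'].isPrefixOf r = true) :
    zTile ('a' :: r) = false := by
  rw [zTile.eq_def]; split <;> simp_all [List.isPrefixOf]

theorem zTile_y_false {r : List Char} (h : r.head? ≠ some 'e') :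
    zTile ('y' :: r) = false := by
  rw [zTile.eq_def]; split <;> simp_all

theorem zTile_w_false {r : List Char} (h : ¬ ['o', 'o'].isPrefixOf r = true) :
    zTile ('w' :: r) = false := by
  rw [zTile.eq_def]; split <;> simp_all [List.isPrefixOf]

theorem zTile_m_false {r : List Char} (h : r.head? ≠ some 'a') :
    zTile ('m' :: r) = false := by
  rw [zTile.eq_def]; split <;> simp_all

theorem zTile_other_false {c : Char} {r : List Char} (h0 : c ≠ '0') (ha : c ≠ 'a')
    (hy : c ≠ 'y') (hw : c ≠ 'w') (hm : c ≠ 'm') : zTile (c :: r) = false := by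
  rw [zTile.eq_def]; split <;> simp_all

theorem allZ_cons_ne {c : Char} (l : List Char) (h : c ≠ '0') : allZ (c :: l) = false := by
  rw [allZ_cons]
  simp [h]

theorem repF_eq_zTile_aux : ∀ n : Nat, ∀ l : List Char, l.length ≤ n → allZ (repF l) = zTile l := by
  intro n
  induction n with
  | zero =>
    intro l hl
    have : l = [] := List.eq_nil_of_length_eq_zero (Nat.le_zero.mp hl)
    subst this
    simp [repF, rep, allZ_nil, zTile]
  | succ n ih =>
    intro l hl
    match l with
    | [] => simp [repF, rep, allZ_nil, zTile]
    | c :: r =>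
      have hlr : r.length ≤ n := by simpa using hl
      by_cases hc0 : c = '0'
      · subst hc0
        rw [repF_pass _ _ (by decide) (by decide) (by decide) (by decide), allZ_cons,
          ih r hlr, zTile_cons_zero]
        simp
      by_cases hca : c = 'a'
      · subst hca
        by_cases hya : ['y', 'a'].isPrefixOf r = true
        · obtain ⟨r2, rfl⟩ := prefix2_shape hya
          have h1 : rep ['a', 'y', 'a'] ['0'] ('a' :: 'y' :: 'a' :: r2)
              = '0' :: rep ['a', 'y', 'a'] ['0'] r2 := by
            rw [rep, if_pos (by simp [List.isPrefixOf])]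
            simp
          have h2 : repF ('a' :: 'y' :: 'a' :: r2) = '0' :: repF r2 := by
            rw [repF, h1, rep_pass _ _ _ _ (by decide), rep_pass _ _ _ _ (by decide),
              rep_pass _ _ _ _ (by decide), repF]
          have hr2 : r2.length ≤ n := by simp at hl; omega
          rw [h2, allZ_cons, ih r2 hr2, zTile_aya]
          simp
        · have h1 : rep ['a', 'y', 'a'] ['0'] ('a' :: r) = 'a' :: rep ['a', 'y', 'a'] ['0'] r := by
            rw [rep, if_neg]
            rintro ⟨hp, -⟩
            refine hya ?_
            simpa [List.isPrefixOf] using hp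
          have h2 : repF ('a' :: r)
              = 'a' :: rep ['m','a'] ['0'] (rep ['w','o','o'] ['0'] (rep ['y','e'] ['0'] (rep ['a','y','a'] ['0'] r))) := by
            rw [repF, h1, rep_pass _ _ _ _ (by decide), rep_pass _ _ _ _ (by decide),
              rep_pass _ _ _ _ (by decide)]
          rw [h2, allZ_cons_ne _ (by decide), zTile_a_false hya]
      by_cases hcy : c = 'y'
      · subst hcy
        by_cases hye : r.head? = some 'e'
        · obtain ⟨r1, rfl⟩ : ∃ r1, r = 'e' :: r1 := by
            cases r with
            | nil => simp at hye
            | cons e r1 => exact ⟨r1, by simpa using congrArg (fun o => o.getD 'x' :: r1) hye⟩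
          have h1 : rep ['a','y','a'] ['0'] ('y' :: 'e' :: r1)
              = 'y' :: 'e' :: rep ['a','y','a'] ['0'] r1 := by
            rw [rep_pass _ _ _ _ (by decide), rep_pass _ _ _ _ (by decide)]
          have h2 : rep ['y','e'] ['0'] ('y' :: 'e' :: rep ['a','y','a'] ['0'] r1)
              = '0' :: rep ['y','e'] ['0'] (rep ['a','y','a'] ['0'] r1) := by
            rw [rep, if_pos (by simp [List.isPrefixOf])]
            simp
          have h3 : repF ('y' :: 'e' :: r1) = '0' :: repF r1 := by
            rw [repF, h1, h2, rep_pass _ _ _ _ (by decide), rep_pass _ _ _ _ (by decide), repF]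
          have hr1 : r1.length ≤ n := by simp at hl; omega
          rw [h3, allZ_cons, ih r1 hr1, zTile_ye]
          simp
        · have h1 : rep ['a','y','a'] ['0'] ('y' :: r) = 'y' :: rep ['a','y','a'] ['0'] r :=
            rep_pass _ _ _ _ (by decide)
          have hne : (rep ['a','y','a'] ['0'] r).head? ≠ some 'e' :=
            rep_head_ne _ _ _ (by decide) hye
          have h2 : rep ['y','e'] ['0'] ('y' :: rep ['a','y','a'] ['0'] r)
              = 'y' :: rep ['y','e'] ['0'] (rep ['a','y','a'] ['0'] r) := rep2_cons _ _ _ _ hne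
          have h3 : repF ('y' :: r)
              = 'y' :: rep ['m','a'] ['0'] (rep ['w','o','o'] ['0'] (rep ['y','e'] ['0'] (rep ['a','y','a'] ['0'] r))) := by
            rw [repF, h1, h2, rep_pass _ _ _ _ (by decide), rep_pass _ _ _ _ (by decide)]
          rw [h3, allZ_cons_ne _ (by decide), zTile_y_false hye]
      by_cases hcw : c = 'w'
      · subst hcw
        by_cases hoo : ['o', 'o'].isPrefixOf r = true
        · obtain ⟨r2, rfl⟩ := prefix2_shape hoo
          have h1 : rep ['a','y','a'] ['0'] ('w' :: 'o' :: 'o' :: r2)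
              = 'w' :: 'o' :: 'o' :: rep ['a','y','a'] ['0'] r2 := by
            rw [rep_pass _ _ _ _ (by decide), rep_pass _ _ _ _ (by decide),
              rep_pass _ _ _ _ (by decide)]
          have h2 : rep ['y','e'] ['0'] ('w' :: 'o' :: 'o' :: rep ['a','y','a'] ['0'] r2)
              = 'w' :: 'o' :: 'o' :: rep ['y','e'] ['0'] (rep ['a','y','a'] ['0'] r2) := by
            rw [rep_pass _ _ _ _ (by decide), rep_pass _ _ _ _ (by decide),
              rep_pass _ _ _ _ (by decide)]
          have h3 : rep ['w','o','o'] ['0'] ('w' :: 'o' :: 'o' :: rep ['y','e'] ['0'] (rep ['a','y','a'] ['0'] r2))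
              = '0' :: rep ['w','o','o'] ['0'] (rep ['y','e'] ['0'] (rep ['a','y','a'] ['0'] r2)) := by
            rw [rep, if_pos (by simp [List.isPrefixOf])]
            simp
          have h4 : repF ('w' :: 'o' :: 'o' :: r2) = '0' :: repF r2 := by
            rw [repF, h1, h2, h3, rep_pass _ _ _ _ (by decide), repF]
          have hr2 : r2.length ≤ n := by simp at hl; omega
          rw [h4, allZ_cons, ih r2 hr2, zTile_woo]
          simp
        · have h1 : rep ['a','y','a'] ['0'] ('w' :: r) = 'w' :: rep ['a','y','a'] ['0'] r :=
            rep_pass _ _ _ _ (by decide)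
          have h2 : rep ['y','e'] ['0'] ('w' :: rep ['a','y','a'] ['0'] r)
              = 'w' :: rep ['y','e'] ['0'] (rep ['a','y','a'] ['0'] r) := rep_pass _ _ _ _ (by decide)
          have hXoo : ¬ ['o','o'].isPrefixOf (rep ['y','e'] ['0'] (rep ['a','y','a'] ['0'] r)) = true := by
            match r with
            | [] => simp [rep, List.isPrefixOf]
            | d :: r1 =>
              by_cases hd : d = 'o'
              · subst hd
                by_cases hr1 : r1.head? = some 'o'
                · refine absurd ?_ hoo
                  obtain ⟨r2, rfl⟩ : ∃ r2, r1 = 'o' :: r2 := by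
                    cases r1 with
                    | nil => simp at hr1
                    | cons e r2 => exact ⟨r2, by simpa using congrArg (fun o => o.getD 'x' :: r2) hr1⟩
                  simp [List.isPrefixOf]
                · have e1 : rep ['a','y','a'] ['0'] ('o' :: r1) = 'o' :: rep ['a','y','a'] ['0'] r1 :=
                    rep_pass _ _ _ _ (by decide)
                  have e2 : rep ['y','e'] ['0'] ('o' :: rep ['a','y','a'] ['0'] r1)
                      = 'o' :: rep ['y','e'] ['0'] (rep ['a','y','a'] ['0'] r1) := rep_pass _ _ _ _ (by decide)
                  rw [e1, e2]
                  have hh : (rep ['y','e'] ['0'] (rep ['a','y','a'] ['0'] r1)).head? ≠ some 'o' :=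
                    rep_head_ne _ _ _ (by decide) (rep_head_ne _ _ _ (by decide) hr1)
                  cases hX : rep ['y','e'] ['0'] (rep ['a','y','a'] ['0'] r1) with
                  | nil => simp [List.isPrefixOf]
                  | cons x xs =>
                    rw [hX] at hh
                    simp [List.isPrefixOf]
                    intro hx
                    exact absurd (by simp [← hx]) hh
              · have hhd : (d :: r1).head? ≠ some 'o' := by simp [hd]
                exact oo_prefix_false _
                  (rep_head_ne _ _ _ (by decide) (rep_head_ne _ _ _ (by decide) hhd))
          have h3 : rep ['w','o','o'] ['0'] ('w' :: rep ['y','e'] ['0'] (rep ['a','y','a'] ['0'] r))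
              = 'w' :: rep ['w','o','o'] ['0'] (rep ['y','e'] ['0'] (rep ['a','y','a'] ['0'] r)) :=
            repW_cons _ _ hXoo
          have h4 : repF ('w' :: r)
              = 'w' :: rep ['m','a'] ['0'] (rep ['w','o','o'] ['0'] (rep ['y','e'] ['0'] (rep ['a','y','a'] ['0'] r))) := by
            rw [repF, h1, h2, h3, rep_pass _ _ _ _ (by decide)]
          rw [h4, allZ_cons_ne _ (by decide), zTile_w_false hoo]
      by_cases hcm : c = 'm'
      · subst hcm
        by_cases hma : r.head? = some 'a'
        · obtain ⟨r1, rfl⟩ : ∃ r1, r = 'a' :: r1 := by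
            cases r with
            | nil => simp at hma
            | cons e r1 => exact ⟨r1, by simpa using congrArg (fun o => o.getD 'x' :: r1) hma⟩
          by_cases hya : ['y', 'a'].isPrefixOf r1 = true
          · obtain ⟨r2, rfl⟩ := prefix2_shape hya
            have h1 : rep ['a','y','a'] ['0'] ('m' :: 'a' :: 'y' :: 'a' :: r2)
                = 'm' :: '0' :: rep ['a','y','a'] ['0'] r2 := by
              rw [rep_pass _ _ _ _ (by decide), rep, if_pos (by simp [List.isPrefixOf])]
              simp
            have h2 : rep ['y','e'] ['0'] ('m' :: '0' :: rep ['a','y','a'] ['0'] r2)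
                = 'm' :: '0' :: rep ['y','e'] ['0'] (rep ['a','y','a'] ['0'] r2) := by
              rw [rep_pass _ _ _ _ (by decide), rep_pass _ _ _ _ (by decide)]
            have h3 : rep ['w','o','o'] ['0'] ('m' :: '0' :: rep ['y','e'] ['0'] (rep ['a','y','a'] ['0'] r2))
                = 'm' :: '0' :: rep ['w','o','o'] ['0'] (rep ['y','e'] ['0'] (rep ['a','y','a'] ['0'] r2)) := by
              rw [rep_pass _ _ _ _ (by decide), rep_pass _ _ _ _ (by decide)]
            have h4 : rep ['m','a'] ['0'] ('m' :: '0' :: rep ['w','o','o'] ['0'] (rep ['y','e'] ['0'] (rep ['a','y','a'] ['0'] r2)))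
                = 'm' :: rep ['m','a'] ['0'] ('0' :: rep ['w','o','o'] ['0'] (rep ['y','e'] ['0'] (rep ['a','y','a'] ['0'] r2))) :=
              rep2_cons _ _ _ _ (by simp)
            have h5 : repF ('m' :: 'a' :: 'y' :: 'a' :: r2)
                = 'm' :: rep ['m','a'] ['0'] ('0' :: rep ['w','o','o'] ['0'] (rep ['y','e'] ['0'] (rep ['a','y','a'] ['0'] r2))) := by
              rw [repF, h1, h2, h3, h4]
            rw [h5, allZ_cons_ne _ (by decide), zTile_ma, zTile_y_false (by simp)]
          · have h1 : rep ['a','y','a'] ['0'] ('m' :: 'a' :: r1)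
                = 'm' :: 'a' :: rep ['a','y','a'] ['0'] r1 := by
              rw [rep_pass _ _ _ _ (by decide), rep, if_neg]
              rintro ⟨hp, -⟩
              refine hya ?_
              simpa [List.isPrefixOf] using hp
            have h2 : rep ['y','e'] ['0'] ('m' :: 'a' :: rep ['a','y','a'] ['0'] r1)
                = 'm' :: 'a' :: rep ['y','e'] ['0'] (rep ['a','y','a'] ['0'] r1) := by
              rw [rep_pass _ _ _ _ (by decide), rep_pass _ _ _ _ (by decide)]
            have h3 : rep ['w','o','o'] ['0'] ('m' :: 'a' :: rep ['y','e'] ['0'] (rep ['a','y','a'] ['0'] r1))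
                = 'm' :: 'a' :: rep ['w','o','o'] ['0'] (rep ['y','e'] ['0'] (rep ['a','y','a'] ['0'] r1)) := by
              rw [rep_pass _ _ _ _ (by decide), rep_pass _ _ _ _ (by decide)]
            have h4 : rep ['m','a'] ['0'] ('m' :: 'a' :: rep ['w','o','o'] ['0'] (rep ['y','e'] ['0'] (rep ['a','y','a'] ['0'] r1)))
                = '0' :: rep ['m','a'] ['0'] (rep ['w','o','o'] ['0'] (rep ['y','e'] ['0'] (rep ['a','y','a'] ['0'] r1))) := by
              rw [rep, if_pos (by simp [List.isPrefixOf])]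
              simp
            have h5 : repF ('m' :: 'a' :: r1) = '0' :: repF r1 := by
              rw [repF, h1, h2, h3, h4, repF]
            have hr1 : r1.length ≤ n := by simp at hl; omega
            rw [h5, allZ_cons, ih r1 hr1, zTile_ma]
            simp
        · have h1 : rep ['a','y','a'] ['0'] ('m' :: r) = 'm' :: rep ['a','y','a'] ['0'] r :=
            rep_pass _ _ _ _ (by decide)
          have h2 : rep ['y','e'] ['0'] ('m' :: rep ['a','y','a'] ['0'] r)
              = 'm' :: rep ['y','e'] ['0'] (rep ['a','y','a'] ['0'] r) := rep_pass _ _ _ _ (by decide)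
          have h3 : rep ['w','o','o'] ['0'] ('m' :: rep ['y','e'] ['0'] (rep ['a','y','a'] ['0'] r))
              = 'm' :: rep ['w','o','o'] ['0'] (rep ['y','e'] ['0'] (rep ['a','y','a'] ['0'] r)) := rep_pass _ _ _ _ (by decide)
          have hXa : (rep ['w','o','o'] ['0'] (rep ['y','e'] ['0'] (rep ['a','y','a'] ['0'] r))).head? ≠ some 'a' :=
            rep_head_ne _ _ _ (by decide) (rep_head_ne _ _ _ (by decide) (rep_head_ne _ _ _ (by decide) hma))
          have h4 : rep ['m','a'] ['0'] ('m' :: rep ['w','o','o'] ['0'] (rep ['y','e'] ['0'] (rep ['a','y','a'] ['0'] r)))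
              = 'm' :: rep ['m','a'] ['0'] (rep ['w','o','o'] ['0'] (rep ['y','e'] ['0'] (rep ['a','y','a'] ['0'] r))) :=
            rep2_cons _ _ _ _ hXa
          have h5 : repF ('m' :: r)
              = 'm' :: rep ['m','a'] ['0'] (rep ['w','o','o'] ['0'] (rep ['y','e'] ['0'] (rep ['a','y','a'] ['0'] r))) := by
            rw [repF, h1, h2, h3, h4]
          rw [h5, allZ_cons_ne _ (by decide), zTile_m_false hma]
      · rw [repF_pass _ _ hca hcy hcw hcm, allZ_cons_ne _ hc0, zTile_other_false hc0 hca hcy hcw hcm]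

theorem repF_eq_zTile (l : List Char) : allZ (repF l) = zTile l :=
  repF_eq_zTile_aux l.length l le_rfl

theorem single_prefix_false {c : Char} {X : List Char} (h : X.head? ≠ some c) :
    [c].isPrefixOf X = false := by
  cases X with
  | nil => simp [List.isPrefixOf]
  | cons d t =>
    simp [List.isPrefixOf]
    intro hd
    exact absurd hd.symm (by simpa using h)

theorem okBgo_eq : ∀ fuel : Nat, ∀ l : List Char, l.length ≤ fuel →
    okBgo fuel l = (zTile l && !(l.contains '0')) := by
  intro fuel
  induction fuel with
  | zero =>
    intro l hl
    have : l = [] := List.eq_nil_of_length_eq_zero (Nat.le_zero.mp hl)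
    subst this
    simp [okBgo, zTile]
  | succ n ih =>
    intro l hl
    match l with
    | [] => simp [okBgo, zTile]
    | c :: r =>
      rw [okBgo]
      by_cases hc0 : c = '0'
      · subst hc0
        rw [if_neg (by simp [List.isPrefixOf]), if_neg (by simp [List.isPrefixOf]),
          if_neg (by simp [List.isPrefixOf]), if_neg (by simp [List.isPrefixOf]),
          zTile_cons_zero]
        simp
      by_cases hca : c = 'a'
      · subst hca
        by_cases hya : ['y', 'a'].isPrefixOf r = true
        · obtain ⟨r2, rfl⟩ := prefix2_shape hya
          rw [if_pos (by simp [List.isPrefixOf])]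
          have hr2 : r2.length ≤ n := by simp at hl; omega
          rw [show (('a' :: 'y' :: 'a' :: r2).drop 3) = r2 from rfl, ih r2 hr2, zTile_aya]
          simp
        · rw [if_neg (by simpa using hya),
            if_neg (by simp [List.isPrefixOf]), if_neg (by simp [List.isPrefixOf]),
            if_neg (by simp [List.isPrefixOf]), zTile_a_false hya]
          simp
      by_cases hcy : c = 'y'
      · subst hcy
        by_cases hye : r.head? = some 'e'
        · obtain ⟨r1, rfl⟩ : ∃ r1, r = 'e' :: r1 := by
            cases r with
            | nil => simp at hye
            | cons e r1 => exact ⟨r1, by simpa using congrArg (fun o => o.getD 'x' :: r1) hye⟩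
          rw [if_neg (by simp [List.isPrefixOf]), if_pos (by simp [List.isPrefixOf])]
          have hr1 : r1.length ≤ n := by simp at hl; omega
          rw [show (('y' :: 'e' :: r1).drop 2) = r1 from rfl, ih r1 hr1, zTile_ye]
          simp
        · rw [if_neg (by simp [List.isPrefixOf]),
            if_neg (by have := single_prefix_false hye; simp_all),
            if_neg (by simp [List.isPrefixOf]), if_neg (by simp [List.isPrefixOf]),
            zTile_y_false hye]
          simp
      by_cases hcw : c = 'w'
      · subst hcw
        by_cases hoo : ['o', 'o'].isPrefixOf r = true
        · obtain ⟨r2, rfl⟩ := prefix2_shape hoo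
          rw [if_neg (by simp [List.isPrefixOf]), if_neg (by simp [List.isPrefixOf]),
            if_pos (by simp [List.isPrefixOf])]
          have hr2 : r2.length ≤ n := by simp at hl; omega
          rw [show (('w' :: 'o' :: 'o' :: r2).drop 3) = r2 from rfl, ih r2 hr2, zTile_woo]
          simp
        · rw [if_neg (by simp [List.isPrefixOf]), if_neg (by simp [List.isPrefixOf]),
            if_neg (by simpa using hoo),
            if_neg (by simp [List.isPrefixOf]), zTile_w_false hoo]
          simp
      by_cases hcm : c = 'm'
      · subst hcm
        by_cases hma : r.head? = some 'a'
        · obtain ⟨r1, rfl⟩ : ∃ r1, r = 'a' :: r1 := by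
            cases r with
            | nil => simp at hma
            | cons e r1 => exact ⟨r1, by simpa using congrArg (fun o => o.getD 'x' :: r1) hma⟩
          rw [if_neg (by simp [List.isPrefixOf]), if_neg (by simp [List.isPrefixOf]),
            if_neg (by simp [List.isPrefixOf]), if_pos (by simp [List.isPrefixOf])]
          have hr1 : r1.length ≤ n := by simp at hl; omega
          rw [show (('m' :: 'a' :: r1).drop 2) = r1 from rfl, ih r1 hr1, zTile_ma]
          simp
        · rw [if_neg (by simp [List.isPrefixOf]), if_neg (by simp [List.isPrefixOf]),
            if_neg (by simp [List.isPrefixOf]),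
            if_neg (by have := single_prefix_false hma; simp_all),
            zTile_m_false hma]
          simp
      · rw [if_neg (by simp [List.isPrefixOf, Ne.symm hca]),
          if_neg (by simp [List.isPrefixOf, Ne.symm hcy]),
          if_neg (by simp [List.isPrefixOf, Ne.symm hcw]),
          if_neg (by simp [List.isPrefixOf, Ne.symm hcm]),
          zTile_other_false hc0 hca hcy hcw hcm]
        simp

theorem countP_lt_strict {α : Type} (p q : α → Bool) (x : α) (hp : p x = true) (hq : q x = false) :
    ∀ l : List α, (∀ y ∈ l, q y = true → p y = true) → x ∈ l → l.countP q < l.countP p := by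
  intro l
  induction l with
  | nil => intro _ hx; cases hx
  | cons a t ih =>
    intro hmono hx
    rw [List.countP_cons, List.countP_cons]
    have hle : t.countP q ≤ t.countP p :=
      List.countP_mono_left (fun y hy => hmono y (List.mem_cons_of_mem _ hy))
    rcases List.mem_cons.mp hx with rfl | hxt
    · rw [hp, hq]
      simp
      omega
    · have h1 := ih (fun y hy => hmono y (List.mem_cons_of_mem _ hy)) hxt
      have h2 : (if q a = true then 1 else 0) ≤ (if p a = true then 1 else 0) := by
        by_cases hqa : q a = true
        · simp [hqa, hmono a List.mem_cons_self hqa]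
        · simp [hqa]
      omega

theorem zTile_eq_okB_of_notD (bb : List String) (hnD : ¬ D_solution bb) :
    ∀ b ∈ bb, zTile b.toList = okB b.toList := by
  intro b hb
  rw [okB, okBgo_eq _ _ le_rfl]
  by_cases hz : zTile b.toList = true
  · have h0 : ¬ ('0' ∈ b.toList) := fun hmem => hnD ⟨b, hb, hmem, hz⟩
    simp [hz, h0]
  · simp only [Bool.not_eq_true] at hz
    simp [hz]

set_option maxHeartbeats 1000000 in
theorem solution_eq_countP (babbling : List String) :
    solution babbling = ((babbling.countP (fun b => zTile b.toList) : Nat) : Int) := by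
  have h : babbling.countP (fun b => innerLoop ["aya", "ye", "woo", "ma"] b)
      = babbling.countP (fun b => zTile b.toList) :=
    List.countP_congr (fun b _ => by rw [innerLoop_eq, repF_eq_zTile])
  rw [solution, PySem.List.foldl_if_add_one (fun b => innerLoop ["aya", "ye", "woo", "ma"] b)
    babbling 0, zero_add, h]

-- ===== VERDICT (by name: the statement is the Claim_ definition above) =====
theorem solution_spec : Claim_unchanged_solution := by
  intro bb _ hnD
  have hcp : List.countP (fun b => zTile b.toList) bb = List.countP (fun b => okB b.toList) bb :=
    List.countP_congr (fun b hb => by rw [zTile_eq_okB_of_notD bb hnD b hb])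
  rw [solution_eq_countP, solution_alt, hcp]

set_option maxHeartbeats 1000000 in
theorem solution_changed : Claim_changed_solution := by
  unfold Claim_changed_solution; decide

theorem solution_tight : Claim_exact_solution := by
  intro bb _ hD
  obtain ⟨b, hb, h0, hz⟩ := hD
  rw [solution_eq_countP, solution_alt]
  have hq : okB b.toList = false := by
    rw [okB, okBgo_eq _ _ le_rfl]
    simp [h0]
  have hmono : ∀ y ∈ bb, okB y.toList = true → zTile y.toList = true := by
    intro y _ hy
    rw [okB, okBgo_eq _ _ le_rfl] at hy
    simp only [Bool.and_eq_true] at hy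
    exact hy.1
  have hlt := countP_lt_strict (fun y => zTile y.toList) (fun y => okB y.toList) b hz hq bb hmono hb
  exact_mod_cast Nat.ne_of_gt hlt
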